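-- pv_equiv track=rewrite | github.com/RostyanYandexLyceumCheeeeck/sys.pro-MiniTasks | Tasks-Algorithms/task_01.py | check
-- ===== SOURCE A (Python) =====
-- L = list[int, ...]
--
-- def check(x: L, y: L, shift: int = 0) -> bool:
--     if len(x) < len(y) + shift:
--         return False
--
--     res = 0
--     for i in range(len(y) - 1, -1, -1):
--         res = 0 if x[i + shift] >= y[i] + res else 1
--     if not shift:
--         return not bool(res)
--
--     for i in range(shift - 1, -1, -1):
--         if x[i] >= res:
--             return True
--     return not bool(res)
-- ===== SOURCE B (Python) =====
-- def check(x, y, shift=0):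
--     if len(x) < len(y) + shift:
--         return False
--     if x[shift:shift + len(y)] >= y:
--         return True
--     return any(x[i] >= 1 for i in range(shift))
-- ===== Notes on version B (the rewrite author's own statement) =====
-- stated objective: simpler
-- what changed: Replaced A's LSB-to-MSB borrow-propagation loop plus early-return scan by a direct lexicographic comparison of the window x[shift:shift+len(y)] against y followed by a single any() over the low digits. Pre_ excludes negative shift, outside the natural domain, where A's value rests on Python negative-index wraparound (and A raises IndexError for shift < -len(x)).
-- outside the precondition, e.g. on check([5], [5], -1): A returns True, B returns False
import Mathlib
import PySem

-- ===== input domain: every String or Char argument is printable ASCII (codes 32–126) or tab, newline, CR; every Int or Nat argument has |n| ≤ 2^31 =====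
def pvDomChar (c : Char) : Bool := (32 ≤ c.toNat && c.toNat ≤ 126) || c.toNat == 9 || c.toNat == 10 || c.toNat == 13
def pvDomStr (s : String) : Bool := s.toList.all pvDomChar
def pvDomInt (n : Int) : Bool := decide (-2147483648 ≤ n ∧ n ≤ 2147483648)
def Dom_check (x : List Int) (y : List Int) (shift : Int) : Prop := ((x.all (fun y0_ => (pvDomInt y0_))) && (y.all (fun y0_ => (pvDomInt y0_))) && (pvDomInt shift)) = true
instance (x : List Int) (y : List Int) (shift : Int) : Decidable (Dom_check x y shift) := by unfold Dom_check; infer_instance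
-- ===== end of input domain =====

-- B replaces A's borrow-propagation loop by a lexicographic window comparison plus one existence
-- scan over the low digits (objective: simpler); equivalence is claimed for shift ≥ 0.

-- ===== PORT A =====
-- second loop of A: 'for i in range(shift-1,-1,-1): if x[i] >= res: return True' then 'return not bool(res)'
def checkLoop2 (x : List Int) (res : Int) : List Int → Bool
  | [] => decide (res = 0)
  | i :: rest => if PySem.List.pyGetD x i 0 ≥ res then true else checkLoop2 x res rest

def check (x : List Int) (y : List Int) (shift : Int) : Bool :=
  if (x.length : Int) < (y.length : Int) + shift then false
  else
    -- x[i+shift], y[i]: in range for every admitted input (0 ≤ shift and the length guard), so pyGetD is exact here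
    let res := (PySem.List.pyRange ((y.length : Int) - 1) (-1) (-1)).foldl
      (fun res i => if PySem.List.pyGetD x (i + shift) 0 ≥ PySem.List.pyGetD y i 0 + res then 0 else 1) 0
    if shift = 0 then decide (res = 0)
    else checkLoop2 x res (PySem.List.pyRange (shift - 1) (-1) (-1))

-- ===== PORT B =====
-- Python's built-in list comparison 'xs >= ys' (lexicographic), hand-ported
def pyGeList : List Int → List Int → Bool
  | _, [] => true
  | [], _ :: _ => false
  | a :: as, b :: bs => if a > b then true else if a < b then false else pyGeList as bs

def check_alt (x : List Int) (y : List Int) (shift : Int) : Bool :=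
  if (x.length : Int) < (y.length : Int) + shift then false
  else if pyGeList (PySem.List.slice x (some shift) (some (shift + (y.length : Int)))) y then true
  else (PySem.List.pyRange 0 shift 1).any (fun i => PySem.List.pyGetD x i 0 ≥ 1)

-- ===== PRECONDITION & SPEC =====
-- Pre_ excludes negative shift: outside the function's natural domain, where A's value rests on
-- Python negative-index wraparound (and A raises IndexError for shift < -len(x)).
def Pre_check (x : List Int) (y : List Int) (shift : Int) : Prop := 0 ≤ shift
instance (x : List Int) (y : List Int) (shift : Int) : Decidable (Pre_check x y shift) := by unfold Pre_check; infer_instance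
def pvWitness_check : List Int × List Int × Int := ([1], [1], 0)

def Spec_check (x : List Int) (y : List Int) (shift : Int) (out : Bool) : Prop := out = check_alt x y shift
instance (x : List Int) (y : List Int) (shift : Int) (out : Bool) : Decidable (Spec_check x y shift out) := by unfold Spec_check; infer_instance

-- ===== CLAIM (what is proved, stated in full; the proofs are below) =====
def Claim_equal_check : Prop := ∀ (x : List Int) (y : List Int) (shift : Int), Dom_check x y shift → Pre_check x y shift → Spec_check x y shift (check x y shift)

-- ===== LEMMAS AND PROOFS =====

-- the borrow as a head-first recursion over y
def borrow (x : List Int) (shift : Int) : List Int → Int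
  | [] => 0
  | b :: bs => if PySem.List.pyGetD x shift 0 ≥ b + borrow x (shift + 1) bs then 0 else 1

lemma borrow_bounds (x : List Int) (shift : Int) (y : List Int) :
    borrow x shift y = 0 ∨ borrow x shift y = 1 := by
  cases y with
  | nil => left; rfl
  | cons b bs => unfold borrow; split_ifs <;> simp

lemma foldr_range_eq_borrow (y x : List Int) (shift : Int) :
    (List.range y.length).foldr
      (fun (k : Nat) (res : Int) => if PySem.List.pyGetD x ((k : Int) + shift) 0 ≥ PySem.List.pyGetD y (k : Int) 0 + res then 0 else 1) 0
    = borrow x shift y := by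
  induction y generalizing shift with
  | nil => rfl
  | cons b bs ih =>
      rw [List.length_cons, List.range_succ_eq_map, List.foldr_cons, List.foldr_map]
      have h : ∀ (k : Nat) (res : Int),
          (if PySem.List.pyGetD x ((↑(Nat.succ k) : Int) + shift) 0 ≥ PySem.List.pyGetD (b :: bs) (↑(Nat.succ k) : Int) 0 + res then (0:Int) else 1)
          = (if PySem.List.pyGetD x ((k : Int) + (shift + 1)) 0 ≥ PySem.List.pyGetD bs (k : Int) 0 + res then (0:Int) else 1) := by
        intro k res
        have h1 : ((Nat.succ k : Nat) : Int) + shift = (k : Int) + (shift + 1) := by push_cast; ring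
        have h2 : PySem.List.pyGetD (b :: bs) (↑(Nat.succ k) : Int) 0 = PySem.List.pyGetD bs (k : Int) 0 := by
          have hc : ((Nat.succ k : Nat) : Int) = ((k + 1 : Nat) : Int) := by push_cast; ring
          rw [hc, PySem.List.pyGetD_natCast, PySem.List.pyGetD_natCast, List.getD_cons_succ]
        rw [h1, h2]
      simp only [h]
      rw [ih (shift + 1)]
      simp [borrow]

lemma res_eq_borrow (x y : List Int) (shift : Int) :
    (PySem.List.pyRange ((y.length : Int) - 1) (-1) (-1)).foldl
      (fun res i => if PySem.List.pyGetD x (i + shift) 0 ≥ PySem.List.pyGetD y i 0 + res then 0 else 1) 0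
    = borrow x shift y := by
  have h1 : PySem.List.pyRange ((y.length : Int) - 1) (-1) (-1)
      = (PySem.List.pyRange 0 (y.length : Int) 1).reverse := by
    have := PySem.List.pyRange_neg_one_eq_reverse ((y.length : Int) - 1) (-1)
    simpa using this
  rw [h1, List.foldl_reverse, PySem.List.pyRange_one, List.foldr_map]
  have h2 : ((y.length : Int) - 0).toNat = y.length := by omega
  rw [h2]
  have h3 : ∀ (k : Nat) (res : Int),
      (if PySem.List.pyGetD x ((0 + (k : Int)) + shift) 0 ≥ PySem.List.pyGetD y (0 + (k : Int)) 0 + res then (0:Int) else 1)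
      = (if PySem.List.pyGetD x ((k : Int) + shift) 0 ≥ PySem.List.pyGetD y (k : Int) 0 + res then (0:Int) else 1) := by
    intro k res; norm_num
  simp only [h3]
  exact foldr_range_eq_borrow y x shift

lemma borrow_ge (y x : List Int) (s : Nat) (hlen : s + y.length ≤ x.length) :
    (borrow x (s : Int) y = 0)
      = (pyGeList (PySem.List.slice x (some (s : Int)) (some ((s : Int) + (y.length : Int)))) y = true) := by
  induction y generalizing s with
  | nil => simp [borrow, pyGeList]
  | cons b bs ih =>
      have hs : s < x.length := by simp at hlen; omega
      have hslice : PySem.List.slice x (some (s : Int)) (some ((s : Int) + ((b :: bs).length : Int)))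
          = x[s] :: PySem.List.slice x (some ((s+1 : Nat) : Int)) (some (((s+1 : Nat) : Int) + (bs.length : Int))) := by
        rw [PySem.List.slice_natCast_add, PySem.List.slice_natCast_add, List.length_cons,
            List.drop_eq_getElem_cons hs, List.take_succ_cons]
      have hget : PySem.List.pyGetD x (s : Int) 0 = x[s] := by
        simp [PySem.List.pyGetD_natCast, List.getD_eq_getElem?_getD, hs]
      have hcast : ((s : Int) + 1) = ((s+1 : Nat) : Int) := by push_cast; ring
      have ihs := ih (s+1) (by simp at hlen ⊢; omega)
      rcases borrow_bounds x ((s : Int) + 1) bs with h0 | h1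
      · -- tail borrow = 0
        unfold borrow
        rw [hget, hslice, h0]
        by_cases hgt : x[s] > b
        · simp only [pyGeList]
          rw [if_pos hgt]
          simp; omega
        · by_cases hlt : x[s] < b
          · simp only [pyGeList]
            rw [if_neg hgt, if_pos hlt]
            simp; omega
          · have heq : x[s] = b := by omega
            simp only [pyGeList]
            rw [if_neg hgt, if_neg hlt]
            rw [hcast] at h0
            rw [← ihs, h0]
            simp; omega
      · unfold borrow
        rw [hget, hslice, h1]
        by_cases hgt : x[s] > b
        · simp only [pyGeList]
          rw [if_pos hgt]
          simp; omega
        · by_cases hlt : x[s] < b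
          · simp only [pyGeList]
            rw [if_neg hgt, if_pos hlt]
            simp; omega
          · have heq : x[s] = b := by omega
            simp only [pyGeList]
            rw [if_neg hgt, if_neg hlt]
            rw [hcast] at h1
            rw [← ihs, h1]
            simp; omega

lemma checkLoop2_zero (x : List Int) (l : List Int) : checkLoop2 x 0 l = true := by
  induction l with
  | nil => rfl
  | cons i rest ih => unfold checkLoop2; split_ifs <;> simp [ih]

lemma checkLoop2_one (x : List Int) (l : List Int) :
    checkLoop2 x 1 l = l.any (fun i => PySem.List.pyGetD x i 0 ≥ 1) := by
  induction l with
  | nil => rfl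
  | cons i rest ih =>
      unfold checkLoop2
      by_cases h : PySem.List.pyGetD x i 0 ≥ 1
      · simp [h]
      · simp [h, ih]

-- ===== VERDICT (by name: the statement is the Claim_ definition above) =====
theorem check_spec : Claim_equal_check := by
  intro x y shift _hdom hpre
  unfold Spec_check check check_alt
  by_cases hguard : (x.length : Int) < (y.length : Int) + shift
  · simp [hguard]
  · rw [if_neg hguard, if_neg hguard]
    have hnn : (0:Int) ≤ shift := hpre
    obtain ⟨s, rfl⟩ : ∃ s : Nat, shift = (s : Int) := ⟨shift.toNat, by omega⟩
    have hlen : s + y.length ≤ x.length := by omega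
    rw [res_eq_borrow]
    have hge := borrow_ge y x s hlen
    rcases borrow_bounds x (s : Int) y with h0 | h1
    · -- no borrow: both sides True
      have hgetrue : pyGeList (PySem.List.slice x (some (s : Int)) (some ((s : Int) + (y.length : Int)))) y = true := by
        rw [← hge, h0]
      rw [h0, hgetrue, if_pos rfl]
      by_cases hs0 : (s : Int) = 0
      · simp [hs0]
      · rw [if_neg hs0, checkLoop2_zero]
    · have hgefalse : pyGeList (PySem.List.slice x (some (s : Int)) (some ((s : Int) + (y.length : Int)))) y = false := by
        rw [h1] at hge
        simpa using hge.symm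
      rw [h1, hgefalse]
      simp only [Bool.false_eq_true, if_false]
      by_cases hs0 : (s : Int) = 0
      · rw [if_pos hs0, hs0]
        simp [PySem.List.pyRange_one_eq_nil]
      · rw [if_neg hs0, checkLoop2_one]
        have hr : PySem.List.pyRange ((s : Int) - 1) (-1) (-1) = (PySem.List.pyRange 0 (s : Int) 1).reverse := by
          have := PySem.List.pyRange_neg_one_eq_reverse ((s : Int) - 1) (-1)
          simpa using this
        rw [hr, List.any_reverse]
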